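-- pv_equiv track=rewrite | github.com/cclgroupltd/ccl_mozilla_reader | ccl_mozilla_reader/serialization_formats/ccl_moz_structured_clone_reader.py | unsparse_array
-- ===== SOURCE A (Python) =====
-- import typing
--
-- def unsparse_array(result: list, length: int, sparse_dict: dict[int, typing.Any], default) -> list:
--     if len(sparse_dict) == 0:
--         return []
--
--     if any(not isinstance(x, int) or x < 0 for x in sparse_dict.keys()):
--         raise ValueError("all dict keys must be positive ints for a sparse array")
--
--     if max(sparse_dict.keys()) >= length:
--         raise ValueError("length is too low for the maximum key")
--
--     result.clear()
--     result.extend(default for _ in range(length))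
--     for k, v in sparse_dict.items():
--         result[k] = v
--
--     return result
-- ===== SOURCE B (Python) =====
-- import typing
--
-- def unsparse_array(result: list, length: int, sparse_dict: dict[int, typing.Any], default) -> list:
--     if len(sparse_dict) == 0:
--         return []
--
--     items = sorted(sparse_dict.items(), key=lambda kv: kv[0])
--     if not all(isinstance(k, int) and k >= 0 for k, _ in items):
--         raise ValueError("all dict keys must be positive ints for a sparse array")
--     if length <= items[-1][0]:
--         raise ValueError("length is too low for the maximum key")
--
--     out = []
--     prev = 0
--     for k, v in items:
--         out.extend([default] * (k - prev))
--         out.append(v)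
--         prev = k + 1
--     out.extend([default] * (length - prev))
--
--     result.clear()
--     result.extend(out)
--     return result
-- ===== Notes on version B (the rewrite author's own statement) =====
-- stated objective: alternative
-- what changed: Replaces fill-with-default-then-scatter-over-dict-items by sort-then-sweep: sort the items by key once, then emit the dense array in a single ordered pass as runs of defaults between consecutive keys, never indexing or looking up the dict.
import Mathlib
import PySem

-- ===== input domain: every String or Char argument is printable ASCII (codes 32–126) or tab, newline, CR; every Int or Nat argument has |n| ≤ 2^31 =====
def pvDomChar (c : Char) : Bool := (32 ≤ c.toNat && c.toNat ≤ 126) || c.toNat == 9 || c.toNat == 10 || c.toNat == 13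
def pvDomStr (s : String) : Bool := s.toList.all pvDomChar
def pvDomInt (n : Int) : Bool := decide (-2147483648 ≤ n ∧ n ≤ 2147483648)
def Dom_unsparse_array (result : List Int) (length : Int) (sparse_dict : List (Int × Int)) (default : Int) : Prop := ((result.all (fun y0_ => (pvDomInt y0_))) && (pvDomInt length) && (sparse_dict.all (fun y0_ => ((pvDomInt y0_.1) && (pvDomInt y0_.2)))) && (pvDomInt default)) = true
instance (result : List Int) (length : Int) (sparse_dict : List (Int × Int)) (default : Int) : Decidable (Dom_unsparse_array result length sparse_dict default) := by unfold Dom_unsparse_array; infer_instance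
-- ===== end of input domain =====

-- B replaces A's fill-then-scatter by sort-then-sweep: sort the items by key, then build the
-- dense array in one ordered pass emitting default-runs between consecutive keys; objective: alternative.
-- A (and B) mutate `result` in place; the equivalence proved is about the RETURN value (B performs the same mutation).


-- ===== PORT A =====
-- Literal port of A: empty-dict early return, the two ValueError guards (raising inputs are
-- outside Pre_; the port returns [] there), fill with default over range(length), then
-- scatter each (k, v). `result[k] = v` is List.set k.toNat v — exact since the guards
-- ensure 0 ≤ k < length on every input inside Pre_.
def unsparse_array (result : List Int) (length : Int) (sparse_dict : List (Int × Int)) (default : Int) : List Int :=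
  if sparse_dict.length = 0 then []
  else if sparse_dict.any (fun kv => decide (kv.1 < 0)) then []  -- Python: raise ValueError (outside Pre_)
  else match PySem.List.max? (sparse_dict.map Prod.fst) (fun x => x) with
    | none => []  -- unreachable: sparse_dict is nonempty here
    | some m =>
      if length ≤ m then []  -- Python: raise ValueError (outside Pre_)
      else
        -- result.clear(); result.extend(default for _ in range(length))
        let res := (PySem.List.pyRange 0 length 1).map (fun _ => default)
        -- for k, v in sparse_dict.items(): result[k] = v
        sparse_dict.foldl (fun acc kv => acc.set kv.1.toNat kv.2) res

-- ===== PORT B =====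
-- Literal port of B: empty-dict early return, sort items by key, validate on the sorted
-- items (all keys ≥ 0; items[-1] is the max key, ported as pyGet? (-1); raising inputs are
-- outside Pre_, the port returns [] there), then sweep once:
-- out.extend([default]*(k-prev)); out.append(v); prev = k+1, finally pad to length.
-- ([default]*(k-prev) with a negative count is []: List.replicate (…).toNat matches.)
def unsparse_array_alt (result : List Int) (length : Int) (sparse_dict : List (Int × Int)) (default : Int) : List Int :=
  if sparse_dict.length = 0 then []
  else
    let items := PySem.List.sorted sparse_dict (fun kv => kv.1) false
    if !(items.all (fun kv => decide (0 ≤ kv.1))) then []  -- Python: raise ValueError (outside Pre_)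
    else match PySem.List.pyGet? items (-1) with
      | none => []  -- unreachable: items is nonempty here
      | some last =>
        if length ≤ last.1 then []  -- Python: raise ValueError (outside Pre_)
        else
          let acc := items.foldl
            (fun (acc : List Int × Int) kv =>
              (acc.1 ++ List.replicate (kv.1 - acc.2).toNat default ++ [kv.2], kv.1 + 1)) ([], 0)
          acc.1 ++ List.replicate (length - acc.2).toNat default

-- ===== PRECONDITION & SPEC =====
-- Pre_ excludes (a) inputs where A raises ValueError (a negative key, or a key ≥ length),
-- and (b) association lists with duplicate keys, which cannot arise from a Python dict.
def Pre_unsparse_array (result : List Int) (length : Int) (sparse_dict : List (Int × Int)) (default : Int) : Prop :=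
  (sparse_dict.map Prod.fst).Nodup ∧ ∀ kv ∈ sparse_dict, 0 ≤ kv.1 ∧ kv.1 < length
instance (result : List Int) (length : Int) (sparse_dict : List (Int × Int)) (default : Int) : Decidable (Pre_unsparse_array result length sparse_dict default) := by unfold Pre_unsparse_array; infer_instance

def pvWitness_unsparse_array : List Int × Int × (List (Int × Int)) × Int := ([5, 6], 4, [(2, 7), (0, 9)], -1)

def Spec_unsparse_array (result : List Int) (length : Int) (sparse_dict : List (Int × Int)) (default : Int) (out : List Int) : Prop := out = unsparse_array_alt result length sparse_dict default
instance (result : List Int) (length : Int) (sparse_dict : List (Int × Int)) (default : Int) (out : List Int) : Decidable (Spec_unsparse_array result length sparse_dict default out) := by unfold Spec_unsparse_array; infer_instance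

-- ===== CLAIM (what is proved, stated in full; the proofs are below) =====
def Claim_equal_unsparse_array : Prop := ∀ (result : List Int) (length : Int) (sparse_dict : List (Int × Int)) (default : Int), Dom_unsparse_array result length sparse_dict default → Pre_unsparse_array result length sparse_dict default → Spec_unsparse_array result length sparse_dict default (unsparse_array result length sparse_dict default)

-- ===== LEMMAS AND PROOFS =====

-- a key absent from the association list looks up to none
theorem get?_eq_none_of_not_mem (t : List (Int × Int)) (i : Int)
    (h : i ∉ t.map Prod.fst) : (PySem.Dict.mk t).get? i = none := by
  induction t with
  | nil => rfl
  | cons kv t ih =>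
      rw [show (PySem.Dict.mk (kv :: t)) = PySem.Dict.mk ((kv.1, kv.2) :: t) by rfl,
          PySem.Dict.get?_mk_cons]
      simp only [List.map_cons, List.mem_cons, not_or] at h
      simp [beq_iff_eq, Ne.symm h.1, ih h.2]

-- first-match lookup is invariant under permutation when keys are unique
theorem get?_eq_of_perm (t₁ t₂ : List (Int × Int)) (hp : t₁.Perm t₂)
    (hnd : (t₁.map Prod.fst).Nodup) (i : Int) :
    (PySem.Dict.mk t₁).get? i = (PySem.Dict.mk t₂).get? i := by
  have hnd₂ : (t₂.map Prod.fst).Nodup := ((hp.map Prod.fst).nodup_iff).1 hnd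
  cases hget : (PySem.Dict.mk t₁).get? i with
  | some v =>
      have hm : (i, v) ∈ t₂ := hp.mem_iff.1 (PySem.Dict.mem_items_of_get?_eq_some _ hget)
      exact (PySem.Dict.get?_of_mem_items (PySem.Dict.mk t₂) hm hnd₂).symm
  | none =>
      have : i ∉ t₂.map Prod.fst := by
        intro hmem
        exact absurd hget (by
          simp only [PySem.Dict.get?_eq_none_iff_not_mem_keys]
          simpa using (hp.map Prod.fst).mem_iff.2 hmem)
      exact (get?_eq_none_of_not_mem t₂ i this).symm

-- main invariant of A's scatter fold, through the dict lookup
theorem scatter_get (t : List (Int × Int)) (acc : List Int) (i : Int) (hi : 0 ≤ i)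
    (hk : ∀ kv ∈ t, 0 ≤ kv.1) (hlt : ∀ kv ∈ t, kv.1.toNat < acc.length)
    (hnd : (t.map Prod.fst).Nodup) :
    (t.foldl (fun a kv => a.set kv.1.toNat kv.2) acc)[i.toNat]? =
      match (PySem.Dict.mk t).get? i with
      | some v => some v
      | none => acc[i.toNat]? := by
  induction t generalizing acc with
  | nil => rfl
  | cons kv t ih =>
      obtain ⟨k, v⟩ := kv
      simp only [List.map_cons, List.nodup_cons] at hnd
      have hk0 : 0 ≤ k := hk (k, v) (by simp)
      have hklt : k.toNat < acc.length := hlt (k, v) (by simp)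
      rw [List.foldl_cons]
      rw [ih (acc.set k.toNat v) (fun kv h => hk kv (List.mem_cons_of_mem _ h))
          (fun kv h => by rw [List.length_set]; exact hlt kv (List.mem_cons_of_mem _ h)) hnd.2]
      rw [PySem.Dict.get?_mk_cons]
      by_cases hki : k = i
      · subst hki
        rw [get?_eq_none_of_not_mem t k hnd.1]
        simp [hklt]
      · have hne : k.toNat ≠ i.toNat := by
          intro h; exact hki (by omega)
        simp only [beq_iff_eq, hki, if_false]
        cases hget : (PySem.Dict.mk t).get? i with
        | some w => rfl
        | none => simp [List.getElem?_set_ne hne]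

-- main invariant of B's sweep fold over key-sorted items: the emitted runs, padded to L,
-- are the gather of the (sorted) association list over [prev, L)
theorem sweep_eq_gather (ts : List (Int × Int)) (L : Int) (pre : List Int) (prev default : Int)
    (hs : ts.Pairwise (fun a b => a.1 < b.1))
    (hb : ∀ kv ∈ ts, prev ≤ kv.1 ∧ kv.1 < L) :
    (ts.foldl (fun (acc : List Int × Int) kv =>
        (acc.1 ++ List.replicate (kv.1 - acc.2).toNat default ++ [kv.2], kv.1 + 1)) (pre, prev)).1
      ++ List.replicate (L - (ts.foldl (fun (acc : List Int × Int) kv =>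
        (acc.1 ++ List.replicate (kv.1 - acc.2).toNat default ++ [kv.2], kv.1 + 1)) (pre, prev)).2).toNat default
    = pre ++ (PySem.List.pyRange prev L 1).map
        (fun i => (PySem.Dict.mk ts).getD i default) := by
  induction ts generalizing pre prev with
  | nil =>
      simp only [List.foldl_nil]
      have : ∀ i, (PySem.Dict.mk ([] : List (Int × Int))).getD i default = default := fun i => rfl
      simp only [this, List.map_const', PySem.List.length_pyRange_one]
  | cons kv ts ih =>
      obtain ⟨k, v⟩ := kv
      obtain ⟨hprev, hkL⟩ := hb (k, v) (by simp)
      simp only [List.pairwise_cons] at hs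
      rw [List.foldl_cons]
      rw [ih _ _ hs.2 (fun kv h => ⟨by have := hs.1 kv h; omega, (hb kv (List.mem_cons_of_mem _ h)).2⟩)]
      -- split [prev, L) into [prev, k), [k], [k+1, L)
      rw [PySem.List.pyRange_one_append prev k L hprev (le_of_lt hkL),
          PySem.List.pyRange_one_cons hkL]
      simp only [List.map_append, List.map_cons, List.append_assoc]
      congr 1
      -- the gap [prev, k) is all defaults
      have hgap : (PySem.List.pyRange prev k 1).map
          (fun i => (PySem.Dict.mk ((k, v) :: ts)).getD i default)
          = List.replicate (k - prev).toNat default := by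
        rw [List.eq_replicate_iff]
        constructor
        · simp [PySem.List.length_pyRange_one]
        · intro b hbm
          obtain ⟨i, him, rfl⟩ := List.mem_map.1 hbm
          rw [PySem.List.mem_pyRange_one] at him
          have hik : i < k := him.2
          rw [PySem.Dict.getD_eq_get?_getD,
              show (PySem.Dict.mk ((k, v) :: ts)) = PySem.Dict.mk (((k : Int), v) :: ts) from rfl,
              PySem.Dict.get?_mk_cons]
          have : (k == i) = false := by simp; omega
          rw [this]
          simp only [Bool.false_eq_true, if_false]
          rw [get?_eq_none_of_not_mem ts i (by
            intro hmem
            obtain ⟨kv₁, hkv₁, rfl⟩ := List.mem_map.1 hmem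
            exact absurd (hs.1 kv₁ hkv₁) (by omega))]
          rfl
      rw [hgap]
      congr 1
      -- head element k ↦ v, tail [k+1, L) looks past the head pair
      have hhead : (PySem.Dict.mk ((k, v) :: ts)).getD k default = v := by
        rw [PySem.Dict.getD_eq_get?_getD,
            show (PySem.Dict.mk ((k, v) :: ts)) = PySem.Dict.mk (((k : Int), v) :: ts) from rfl,
            PySem.Dict.get?_mk_cons]
        simp
      rw [hhead, List.singleton_append]
      congr 1
      apply List.map_congr_left
      intro i him
      rw [PySem.List.mem_pyRange_one] at him
      rw [PySem.Dict.getD_eq_get?_getD, PySem.Dict.getD_eq_get?_getD,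
          show (PySem.Dict.mk ((k, v) :: ts)) = PySem.Dict.mk (((k : Int), v) :: ts) from rfl,
          PySem.Dict.get?_mk_cons]
      have : (k == i) = false := by simp; omega
      rw [this]
      simp

-- ===== VERDICT (by name: the statement is the Claim_ definition above) =====
theorem unsparse_array_spec : Claim_equal_unsparse_array := by
  unfold Claim_equal_unsparse_array
  intro result length sd default _ hpre
  obtain ⟨hnd, hb⟩ := hpre
  unfold Spec_unsparse_array unsparse_array unsparse_array_alt
  by_cases h0 : sd.length = 0
  · simp [h0]
  · simp only [h0, if_false]
    set ts := PySem.List.sorted sd (fun kv => kv.1) false with hts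
    have hperm : ts.Perm sd := PySem.List.sorted_perm sd (fun kv => kv.1) false
    -- B's guards
    have hall : ts.all (fun kv => decide (0 ≤ kv.1)) = true := by
      simp only [List.all_eq_true, decide_eq_true_eq]
      intro kv hm
      exact (hb kv (hperm.mem_iff.1 hm)).1
    rw [hall]
    simp only [Bool.not_true, Bool.false_eq_true, if_false]
    have htsne : ts ≠ [] := by
      intro h
      exact h0 (by simpa [h] using hperm.length_eq.symm)
    rw [PySem.List.pyGet?_neg_one]
    cases hlastq : ts.getLast? with
    | none => exact absurd (List.getLast?_eq_none_iff.1 hlastq) htsne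
    | some last =>
      have hlmem : last ∈ sd := hperm.mem_iff.1 (List.mem_of_getLast? hlastq)
      have hllt : ¬ length ≤ last.1 := not_le.2 (hb last hlmem).2
      simp only [hllt, if_false]
      -- A's guards
      have hneg : sd.any (fun kv => decide (kv.1 < 0)) = false := by
        simp only [List.any_eq_false, decide_eq_true_eq]
        intro kv hm
        simp [not_lt.2 (hb kv hm).1]
      rw [hneg]
      simp only [Bool.false_eq_true, if_false]
      cases hmax : PySem.List.max? (sd.map Prod.fst) (fun x => x) with
      | none =>
          exfalso
          have := (PySem.List.max?_eq_none_iff (sd.map Prod.fst) (fun x => x)).1 hmax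
          exact h0 (by simpa using congrArg List.length this)
      | some m =>
        have hm : m ∈ sd.map Prod.fst := PySem.List.max?_mem hmax
        obtain ⟨kv0, hkv0, hmk⟩ := List.mem_map.1 hm
        have hmlt : ¬ length ≤ m := not_le.2 (hmk ▸ (hb kv0 hkv0).2)
        simp only [hmlt, if_false]
        -- the sorted items: a permutation of sd with strictly increasing keys
        have hnd_ts : (ts.map Prod.fst).Nodup := ((hperm.map Prod.fst).nodup_iff).2 hnd
        have hle : ts.Pairwise (fun a b => a.1 ≤ b.1) :=
          PySem.List.sorted_pairwise sd (fun kv => kv.1)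
        have hne : ts.Pairwise (fun a b => a.1 ≠ b.1) := by
          rw [List.nodup_iff_pairwise_ne] at hnd_ts
          exact List.pairwise_map.mp hnd_ts
        have hslt : ts.Pairwise (fun a b => a.1 < b.1) :=
          (hle.and hne).imp (fun h => lt_of_le_of_ne h.1 h.2)
        -- B side: sweep over sorted items = gather over ts on [0, length)
        rw [sweep_eq_gather ts length [] 0 default hslt
          (fun kv h => ⟨(hb kv (hperm.mem_iff.1 h)).1, (hb kv (hperm.mem_iff.1 h)).2⟩)]
        rw [List.nil_append]
        -- A side: scatter = the same gather over sd, elementwise; lookup is perm-invariant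
        refine List.ext_getElem? (fun j => ?_)
        have hlen : ((PySem.List.pyRange 0 length 1).map (fun _ => default)).length
            = (length - 0).toNat := by
          simp [PySem.List.length_pyRange_one]
        have hsc := scatter_get sd ((PySem.List.pyRange 0 length 1).map (fun _ => default)) (j : Int) (Int.natCast_nonneg j)
          (fun kv h => (hb kv h).1)
          (fun kv h => by
            rw [hlen]
            have := hb kv h
            omega)
          hnd
        rw [Int.toNat_natCast] at hsc
        rw [hsc]
        by_cases hj : j < (length - 0).toNat
        · have hrange : (PySem.List.pyRange 0 length 1)[j]? = some (0 + (j : Int)) := by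
            rw [PySem.List.getElem?_pyRange_one, if_pos hj]
          rw [List.getElem?_map, List.getElem?_map, hrange]
          simp only [Option.map_some, zero_add]
          rw [PySem.Dict.getD_eq_get?_getD,
              get?_eq_of_perm ts sd hperm hnd_ts (j : Int)]
          cases hget : (PySem.Dict.mk sd).get? (j : Int) with
          | some w => rfl
          | none => rfl
        · have h1 : ((PySem.List.pyRange 0 length 1).map (fun _ => default))[j]? = none := by
            rw [List.getElem?_eq_none]; omega
          have h2 : ((PySem.List.pyRange 0 length 1).map
              (fun i => (PySem.Dict.mk ts).getD i default))[j]? = none := by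
            rw [List.getElem?_eq_none]
            simp only [List.length_map, PySem.List.length_pyRange_one]
            omega
          rw [h1, h2]
          cases hget : (PySem.Dict.mk sd).get? (j : Int) with
          | some w =>
              exfalso
              have hmem := PySem.Dict.mem_items_of_get?_eq_some _ hget
              have hjmem : (j : Int) ∈ sd.map Prod.fst :=
                List.mem_map.2 ⟨(⟨(j : Int), w⟩ : Int × Int), hmem, rfl⟩
              obtain ⟨kv1, hkv1, hjk⟩ := List.mem_map.1 hjmem
              have := hb kv1 hkv1
              omega
          | none => rfl
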